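-- pv_equiv track=rewrite | github.com/lmingarelli/university-notes | algorithm-design/exam-2025-03/ex1.py | es1
-- ===== SOURCE A (Python) =====
-- def es1(G):
--     n = len(G)
--     visited = [False] * n
--     components = []
--
--     # O(n + m)
--     def dfs(node, component):
--         visited[node] = True
--         component.append(node)
--         for neighbor in G[node]:
--             if not visited[neighbor]:
--                 dfs(neighbor, component)
--
--     # O(n)
--     for i in range(n):
--         if not visited[i]:
--             component = []
--             dfs(i, component)
--             components.append(component)
--
--     # O(n)
--     arches_to_add = []
--     for i in range(1, len(components)):
--         arches_to_add.append((components[i-1][0], components[i][0]))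
--
--     return arches_to_add
-- ===== SOURCE B (Python) =====
-- def es1(G):
--     n = len(G)
--     visited = [False] * n
--     seeds = []
--     for i in range(n):
--         if not visited[i]:
--             seeds.append(i)
--             visited[i] = True
--             # saturate: propagate reachability until a full sweep changes nothing
--             for _ in range(n):
--                 changed = False
--                 for u in range(n):
--                     if visited[u]:
--                         for v in G[u]:
--                             if not visited[v]:
--                                 visited[v] = True
--                                 changed = True
--                 if not changed:
--                     break
--     return list(zip(seeds, seeds[1:]))
-- ===== Notes on version B (the rewrite author's own statement) =====
-- stated objective: alternative
-- what changed: A's recursive DFS component discovery is replaced by iterative reachability saturation: for each yet-unvisited seed vertex, repeatedly sweep all vertices propagating visited marks along their adjacency lists until a sweep changes nothing (early break), collecting the seed vertices directly and pairing consecutive seeds with zip instead of indexing component lists.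
import Mathlib
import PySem

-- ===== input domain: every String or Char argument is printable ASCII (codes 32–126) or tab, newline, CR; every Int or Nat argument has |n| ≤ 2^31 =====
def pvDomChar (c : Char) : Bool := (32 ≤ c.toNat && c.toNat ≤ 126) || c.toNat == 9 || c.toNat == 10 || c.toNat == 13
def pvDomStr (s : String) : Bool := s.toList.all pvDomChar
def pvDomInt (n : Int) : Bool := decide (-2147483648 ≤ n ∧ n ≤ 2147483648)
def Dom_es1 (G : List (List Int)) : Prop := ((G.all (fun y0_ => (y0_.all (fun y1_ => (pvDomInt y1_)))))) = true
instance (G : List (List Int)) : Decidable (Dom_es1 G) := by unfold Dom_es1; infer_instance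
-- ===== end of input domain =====

-- B replaces A's recursive DFS component discovery by round-based reachability
-- saturation (repeated sweeps until a sweep marks nothing), collecting component
-- seeds directly; objective: alternative algorithm, no speed claim.

-- ===== PORT A =====
-- A's recursive dfs; the extra `fuel` argument (n at every top-level call) is only a
-- termination guard and is proven never to run out on inputs satisfying Pre_es1.
def dfsA (G : List (List Int)) : Nat → Int → List Bool → List Int → List Bool × List Int
  | 0, _, visited, component => (visited, component)
  | fuel+1, node, visited, component =>
    -- visited[node] = True ; component.append(node)
    let visited := PySem.List.pySetD visited node true
    let component := component ++ [node]
    -- for neighbor in G[node]: if not visited[neighbor]: dfs(neighbor, component)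
    (PySem.List.pyGetD G node []).foldl
      (fun st nb => if PySem.List.pyGetD st.1 nb false then st else dfsA G fuel nb st.1 st.2)
      (visited, component)

def es1 (G : List (List Int)) : List (Int × Int) :=
  let n := G.length
  -- for i in range(n): if not visited[i]: dfs(i, component); components.append(component)
  let st := (List.range n).foldl
    (fun (st : List Bool × List (List Int)) i =>
      if st.1.getD i false then st
      else
        let r := dfsA G n (Int.ofNat i) st.1 []
        (r.1, st.2 ++ [r.2]))
    (List.replicate n false, [])
  -- for i in range(1, len(components)): append (components[i-1][0], components[i][0]);
  -- components are never empty under Pre_es1 (dfs appends its node first), so headD 0 is exact.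
  (List.range' 1 (st.2.length - 1)).foldl
    (fun acc i => acc ++ [((st.2.getD (i-1) []).headD 0, (st.2.getD i []).headD 0)]) []

-- ===== PORT B =====
-- inner loop: for v in G[u]: if not visited[v]: visited[v] = True; changed = True
def markRowB (row : List Int) (st : List Bool × Bool) : List Bool × Bool :=
  row.foldl
    (fun st v =>
      if PySem.List.pyGetD st.1 v false then st
      else (PySem.List.pySetD st.1 v true, true))
    st

-- one sweep: for u in range(n): if visited[u]: <mark G[u]>
def roundB (G : List (List Int)) (n : Nat) (visited : List Bool) : List Bool × Bool :=
  (List.range n).foldl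
    (fun st u => if st.1.getD u false then markRowB (G.getD u []) st else st)
    (visited, false)

-- for _ in range(n): changed-sweep; if not changed: break  (break ported as a done-flag that skips the rest)
def saturateB (G : List (List Int)) (n : Nat) (visited : List Bool) : List Bool :=
  ((List.range n).foldl
    (fun (st : List Bool × Bool) _ =>
      if st.2 then st
      else
        let r := roundB G n st.1
        (r.1, !r.2))
    (visited, false)).1

def es1_alt (G : List (List Int)) : List (Int × Int) :=
  let n := G.length
  let st := (List.range n).foldl
    (fun (st : List Bool × List Int) i =>
      if st.1.getD i false then st
      else (saturateB G n (st.1.set i true), st.2 ++ [(i : Int)]))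
    (List.replicate n false, [])
  st.2.zip (st.2.drop 1)

-- ===== PRECONDITION & SPEC =====
-- Pre_es1 admits every adjacency list on which Python's indexing is defined
-- (-n ≤ v < n for each entry; negative entries follow Python's wraparound, which
-- both ports model through pyGetD/pySetD): A raises IndexError outside these bounds.
def Pre_es1 (G : List (List Int)) : Prop :=
  ∀ row ∈ G, ∀ v ∈ row, -(G.length : Int) ≤ v ∧ v < (G.length : Int)
instance (G : List (List Int)) : Decidable (Pre_es1 G) := by unfold Pre_es1; infer_instance

def pvWitness_es1 : List (List Int) := [[1], [0], [], [2, 0]]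

def Spec_es1 (G : List (List Int)) (out : List (Int × Int)) : Prop := out = es1_alt G
instance (G : List (List Int)) (out : List (Int × Int)) : Decidable (Spec_es1 G out) := by unfold Spec_es1; infer_instance

-- ===== CLAIM (what is proved, stated in full; the proofs are below) =====
def Claim_equal_es1 : Prop := ∀ (G : List (List Int)), Dom_es1 G → Pre_es1 G → Spec_es1 G (es1 G)

-- ===== LEMMAS AND PROOFS =====

-- Python's (possibly negative) list index, wrapped to a Nat position
def wIdx (n : Nat) (v : Int) : Nat := (if v < 0 then v + (n : Int) else v).toNat

-- one step of the edge relation, on (Nat) vertex positions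
def StepN (G : List (List Int)) (u v : Nat) : Prop :=
  u < G.length ∧ ∃ x ∈ G.getD u [], wIdx G.length x = v

def ReachN (G : List (List Int)) : Nat → Nat → Prop := Relation.ReflTransGen (StepN G)

-- pointwise inclusion of visited arrays
def SubV (V W : List Bool) : Prop := ∀ i : Nat, V.getD i false = true → W.getD i false = true

-- visited array closed under the edge relation
def ClosedSt (G : List (List Int)) (V : List Bool) : Prop :=
  ∀ u v : Nat, StepN G u v → V.getD u false = true → V.getD v false = true

-- number of marked vertices
def cnt (V : List Bool) : Nat :=
  ((Finset.range V.length).filter (fun i => V.getD i false = true)).card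

lemma wIdx_lt (n : Nat) (v : Int) (h1 : -(n:Int) ≤ v) (h2 : v < (n:Int)) : wIdx n v < n := by
  unfold wIdx; split <;> omega

lemma wIdx_natCast (n i : Nat) : wIdx n (Int.ofNat i) = i := by
  unfold wIdx
  rw [if_neg (show ¬(Int.ofNat i < 0) from Int.not_lt.2 (Int.natCast_nonneg i))]
  rfl

lemma pyGetD_wrap {α : Type} (xs : List α) (d : α) (v : Int) (n : Nat) (hlen : xs.length = n)
    (h1 : -(n:Int) ≤ v) (h2 : v < (n:Int)) :
    PySem.List.pyGetD xs v d = xs.getD (wIdx n v) d := by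
  subst hlen
  by_cases h0 : 0 ≤ v
  · rw [PySem.List.pyGetD_of_nonneg xs d h0]
    unfold wIdx
    rw [if_neg (by omega)]
  · have hk : v = -(((-v).toNat : Nat) : Int) := by omega
    rw [hk, PySem.List.pyGetD_neg_natCast _ _ _ (by omega) (by omega)]
    unfold wIdx
    rw [if_pos (by omega), List.getD_eq_getElem?_getD, List.getElem?_eq_getElem (by omega)]
    congr 1
    omega

lemma pySetD_wrap (xs : List Bool) (v : Int) (b : Bool) (n : Nat) (hlen : xs.length = n)
    (h1 : -(n:Int) ≤ v) (h2 : v < (n:Int)) :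
    PySem.List.pySetD xs v b = xs.set (wIdx n v) b := by
  subst hlen
  by_cases h0 : 0 ≤ v
  · rw [PySem.List.pySetD_of_nonneg xs b h0]
    unfold wIdx; rw [if_neg (by omega)]
  · unfold wIdx
    rw [if_pos (by omega)]
    unfold PySem.List.pySetD PySem.List.pySet? PySem.List.pyIdx?
    rw [if_neg h0, if_pos h1]
    simp only [Option.map_some, Option.getD_some]
    congr 1
    omega

lemma getD_true_lt_length (V : List Bool) (i : Nat) (h : V.getD i false = true) : i < V.length := by
  by_contra hn
  rw [List.getD_eq_getElem?_getD, List.getElem?_eq_none (by omega)] at h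
  simp at h

lemma getD_set_true_self (V : List Bool) (i : Nat) (h : i < V.length) :
    (V.set i true).getD i false = true := by
  rw [List.getD_eq_getElem?_getD, List.getElem?_set_self (by omega)]
  simp

lemma getD_set_other (V : List Bool) (i j : Nat) (b : Bool) (h : j ≠ i) :
    (V.set i b).getD j false = V.getD j false := by
  rw [List.getD_eq_getElem?_getD, List.getElem?_set_ne (by omega), ← List.getD_eq_getElem?_getD]

lemma subV_refl (V : List Bool) : SubV V V := fun _ h => h

lemma subV_trans {V W X : List Bool} (h1 : SubV V W) (h2 : SubV W X) : SubV V X :=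
  fun i h => h2 i (h1 i h)

lemma subV_set (V : List Bool) (i : Nat) : SubV V (V.set i true) := by
  intro j hj
  by_cases hji : j = i
  · subst hji
    exact getD_set_true_self V j (getD_true_lt_length V j hj)
  · rw [getD_set_other V i j true hji]; exact hj

lemma getD_set_true_cases (V : List Bool) (i j : Nat)
    (h : (V.set i true).getD j false = true) : j = i ∨ V.getD j false = true := by
  by_cases hji : j = i
  · exact Or.inl hji
  · right; rwa [getD_set_other V i j true hji] at h

lemma cnt_le_length (V : List Bool) : cnt V ≤ V.length := by
  unfold cnt
  calc ((Finset.range V.length).filter _).card ≤ (Finset.range V.length).card :=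
        Finset.card_le_card (Finset.filter_subset _ _)
    _ = V.length := Finset.card_range _

lemma cnt_mono {V W : List Bool} (hl : V.length = W.length) (h : SubV V W) : cnt V ≤ cnt W := by
  unfold cnt
  apply Finset.card_le_card
  intro i hi
  simp only [Finset.mem_filter, Finset.mem_range] at hi ⊢
  exact ⟨hl ▸ hi.1, h i hi.2⟩

lemma cnt_strict {V W : List Bool} (hl : V.length = W.length) (h : SubV V W)
    (i : Nat) (hiV : V.getD i false = false) (hiW : W.getD i false = true) :
    cnt V < cnt W := by
  unfold cnt
  apply Finset.card_lt_card
  constructor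
  · intro j hj
    simp only [Finset.mem_filter, Finset.mem_range] at hj ⊢
    exact ⟨hl ▸ hj.1, h j hj.2⟩
  · intro hsub
    have hiW' : i ∈ (Finset.range W.length).filter (fun j => W.getD j false = true) := by
      simp only [Finset.mem_filter, Finset.mem_range]
      exact ⟨getD_true_lt_length W i hiW, hiW⟩
    have := hsub hiW'
    simp only [Finset.mem_filter, Finset.mem_range] at this
    rw [this.2] at hiV; cases hiV

lemma cnt_lt_of_false (V : List Bool) (i : Nat) (hi : i < V.length)
    (h : V.getD i false = false) : cnt V < V.length := by
  unfold cnt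
  calc ((Finset.range V.length).filter _).card
      ≤ ((Finset.range V.length).erase i).card := by
        apply Finset.card_le_card
        intro j hj
        simp only [Finset.mem_filter, Finset.mem_range] at hj
        apply Finset.mem_erase.2
        refine ⟨?_, Finset.mem_range.2 hj.1⟩
        rintro rfl; rw [hj.2] at h; cases h
    _ < (Finset.range V.length).card := by
        apply Finset.card_erase_lt_of_mem
        exact Finset.mem_range.2 hi
    _ = V.length := Finset.card_range _

lemma cnt_pos (V : List Bool) (i : Nat) (h : V.getD i false = true) : 1 ≤ cnt V := by
  unfold cnt
  apply Finset.card_pos.2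
  exact ⟨i, by simp only [Finset.mem_filter, Finset.mem_range]; exact ⟨getD_true_lt_length V i h, h⟩⟩

lemma cnt_set_lt (V : List Bool) (i : Nat) (hi : i < V.length)
    (h : V.getD i false = false) : cnt V < cnt (V.set i true) :=
  cnt_strict (by simp) (subV_set V i) i h (getD_set_true_self V i hi)

lemma ext_of_getD (V W : List Bool) (hl : V.length = W.length)
    (h : ∀ i, i < V.length → V.getD i false = W.getD i false) : V = W := by
  apply List.ext_getElem hl
  intro i h1 h2
  have := h i h1
  rwa [List.getD_eq_getElem?_getD, List.getD_eq_getElem?_getD,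
    List.getElem?_eq_getElem h1, List.getElem?_eq_getElem h2] at this

lemma getD_replicate_false (n i : Nat) : (List.replicate n false).getD i false = false := by
  rw [List.getD_eq_getElem?_getD]
  by_cases h : i < n
  · rw [List.getElem?_eq_getElem (by simpa)]
    simp
  · rw [List.getElem?_eq_none (by simpa using h)]
    rfl

-- the contract of one dfs call: grows the visited set, marks node, adds only
-- vertices reachable from node, and the vertices it adds have all successors marked
def DfsOK (G : List (List Int)) (node : Int) (V W : List Bool) : Prop :=
  W.length = G.length ∧ SubV V W ∧ W.getD (wIdx G.length node) false = true ∧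
  (∀ i : Nat, i < G.length → W.getD i false = true →
      V.getD i false = true ∨ ReachN G (wIdx G.length node) i) ∧
  (∀ u v : Nat, StepN G u v → W.getD u false = true → V.getD u false = false →
      W.getD v false = true)

lemma dfsFold_spec (G : List (List Int)) (_hG : Pre_es1 G) (fuel : Nat)
    (IH : ∀ (node : Int) (V : List Bool) (c : List Int),
      V.length = G.length → -(G.length : Int) ≤ node → node < (G.length : Int) →
      V.getD (wIdx G.length node) false = false → G.length ≤ cnt V + fuel →
      DfsOK G node V (dfsA G fuel node V c).1) :
    ∀ (row : List Int), (∀ v ∈ row, -(G.length : Int) ≤ v ∧ v < (G.length : Int)) →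
    ∀ (S : List Bool) (c : List Int), S.length = G.length → G.length ≤ cnt S + fuel →
    ((row.foldl (fun st nb => if PySem.List.pyGetD st.1 nb false then st
        else dfsA G fuel nb st.1 st.2) (S, c)).1.length = G.length ∧
     SubV S (row.foldl (fun st nb => if PySem.List.pyGetD st.1 nb false then st
        else dfsA G fuel nb st.1 st.2) (S, c)).1 ∧
     (∀ v ∈ row, (row.foldl (fun st nb => if PySem.List.pyGetD st.1 nb false then st
        else dfsA G fuel nb st.1 st.2) (S, c)).1.getD (wIdx G.length v) false = true) ∧
     (∀ i : Nat, i < G.length → (row.foldl (fun st nb => if PySem.List.pyGetD st.1 nb false then st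
        else dfsA G fuel nb st.1 st.2) (S, c)).1.getD i false = true →
        S.getD i false = true ∨ ∃ v ∈ row, ReachN G (wIdx G.length v) i) ∧
     (∀ u v : Nat, StepN G u v →
        (row.foldl (fun st nb => if PySem.List.pyGetD st.1 nb false then st
          else dfsA G fuel nb st.1 st.2) (S, c)).1.getD u false = true →
        S.getD u false = false →
        (row.foldl (fun st nb => if PySem.List.pyGetD st.1 nb false then st
          else dfsA G fuel nb st.1 st.2) (S, c)).1.getD v false = true)) := by
  intro row
  induction row with
  | nil =>
    intro _ S c hlen _
    refine ⟨hlen, subV_refl S, by simp, fun i _ h => Or.inl h, fun u v _ h1 h2 => ?_⟩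
    simp only [List.foldl_nil] at h1
    rw [h1] at h2; cases h2
  | cons h t ih =>
    intro hrow S c hlen hcnt
    have hh := hrow h (by simp)
    have hget : PySem.List.pyGetD S h false = S.getD (wIdx G.length h) false :=
      pyGetD_wrap S false h G.length hlen hh.1 hh.2
    simp only [List.foldl_cons]
    by_cases hv : S.getD (wIdx G.length h) false = true
    · rw [if_pos (by rw [hget]; exact hv)]
      obtain ⟨L1, L2, L3, L4, L5⟩ := ih (fun v hv => hrow v (by simp [hv])) S c hlen hcnt
      refine ⟨L1, L2, ?_, ?_, L5⟩
      · intro v hvm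
        rcases List.mem_cons.1 hvm with rfl | hvt
        · exact L2 (wIdx G.length v) hv
        · exact L3 v hvt
      · intro i hi hFi
        rcases L4 i hi hFi with hS | ⟨v, hvt, hr⟩
        · exact Or.inl hS
        · exact Or.inr ⟨v, by simp [hvt], hr⟩
    · rw [if_neg (by rw [hget]; simpa using hv)]
      have hvf : S.getD (wIdx G.length h) false = false := by
        cases hx : S.getD (wIdx G.length h) false
        · rfl
        · exact absurd hx hv
      obtain ⟨D1, D2, D3, D4, D5⟩ := IH h S c hlen hh.1 hh.2 hvf hcnt
      set S1 := (dfsA G fuel h S c).1 with hS1def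
      have hcnt1 : G.length ≤ cnt S1 + fuel :=
        le_trans hcnt (by have := cnt_mono (by omega) D2; omega)
      obtain ⟨L1, L2, L3, L4, L5⟩ :=
        ih (fun v hv => hrow v (by simp [hv])) S1 (dfsA G fuel h S c).2 D1 hcnt1
      refine ⟨L1, subV_trans D2 L2, ?_, ?_, ?_⟩
      · intro v hvm
        rcases List.mem_cons.1 hvm with rfl | hvt
        · exact L2 (wIdx G.length v) D3
        · exact L3 v hvt
      · intro i hi hFi
        rcases L4 i hi hFi with hS1i | ⟨v, hvt, hr⟩
        · rcases D4 i hi hS1i with hSi | hr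
          · exact Or.inl hSi
          · exact Or.inr ⟨h, by simp, hr⟩
        · exact Or.inr ⟨v, by simp [hvt], hr⟩
      · intro u v hstep hFu hSu
        cases hS1u : S1.getD u false
        · exact L5 u v hstep hFu hS1u
        · exact L2 v (D5 u v hstep hS1u hSu)

lemma dfsA_spec (G : List (List Int)) (hG : Pre_es1 G) :
    ∀ (fuel : Nat) (node : Int) (V : List Bool) (c : List Int),
      V.length = G.length → -(G.length : Int) ≤ node → node < (G.length : Int) →
      V.getD (wIdx G.length node) false = false → G.length ≤ cnt V + fuel →
      DfsOK G node V (dfsA G fuel node V c).1 := by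
  intro fuel
  induction fuel with
  | zero =>
    intro node V c hlen h0 hn hf hcnt
    exfalso
    have hlt : (wIdx G.length node) < V.length := by
      rw [hlen]; exact wIdx_lt G.length node h0 hn
    have := cnt_lt_of_false V (wIdx G.length node) hlt hf
    omega
  | succ fuel ih =>
    intro node V c hlen h0 hn hf hcnt
    have hsetD : PySem.List.pySetD V node true = V.set (wIdx G.length node) true :=
      pySetD_wrap V node true G.length hlen h0 hn
    have hgetG : PySem.List.pyGetD G node ([] : List Int) = G.getD (wIdx G.length node) [] :=
      pyGetD_wrap G ([] : List Int) node G.length rfl h0 hn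
    have hnode : (wIdx G.length node) < G.length := wIdx_lt G.length node h0 hn
    have hrowmem : G.getD (wIdx G.length node) [] ∈ G := by
      rw [List.getD_eq_getElem?_getD, List.getElem?_eq_getElem hnode]
      exact List.getElem_mem hnode
    have hrow : ∀ v ∈ G.getD (wIdx G.length node) [], -(G.length : Int) ≤ v ∧ v < (G.length : Int) :=
      fun v hv => hG _ hrowmem v hv
    have hV1len : (V.set (wIdx G.length node) true).length = G.length := by simp [hlen]
    have hV1cnt : G.length ≤ cnt (V.set (wIdx G.length node) true) + fuel := by
      have := cnt_set_lt V (wIdx G.length node) (by rw [hlen]; exact hnode) hf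
      omega
    show DfsOK G node V (dfsA G (fuel+1) node V c).1
    have hunf : dfsA G (fuel+1) node V c =
        (PySem.List.pyGetD G node []).foldl
          (fun st nb => if PySem.List.pyGetD st.1 nb false then st else dfsA G fuel nb st.1 st.2)
          (PySem.List.pySetD V node true, c ++ [node]) := rfl
    rw [hunf, hsetD, hgetG]
    obtain ⟨L1, L2, L3, L4, L5⟩ :=
      dfsFold_spec G hG fuel ih (G.getD (wIdx G.length node) []) hrow
        (V.set (wIdx G.length node) true) (c ++ [node]) hV1len hV1cnt
    set F := ((G.getD (wIdx G.length node) []).foldl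
      (fun st nb => if PySem.List.pyGetD st.1 nb false then st else dfsA G fuel nb st.1 st.2)
      (V.set (wIdx G.length node) true, c ++ [node])).1 with hF
    refine ⟨L1, subV_trans (subV_set V (wIdx G.length node)) L2, L2 (wIdx G.length node) (getD_set_true_self V (wIdx G.length node) (by rw [hlen]; exact hnode)), ?_, ?_⟩
    · intro i hi hFi
      rcases L4 i hi hFi with hV1 | ⟨v, hvm, hr⟩
      · rcases getD_set_true_cases V (wIdx G.length node) i hV1 with rfl | hVi
        · exact Or.inr Relation.ReflTransGen.refl
        · exact Or.inl hVi
      · exact Or.inr (Relation.ReflTransGen.head ⟨hnode, v, hvm, rfl⟩ hr)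
    · intro u v hstep hFu hVu
      cases hV1u : (V.set (wIdx G.length node) true).getD u false
      · exact L5 u v hstep hFu hV1u
      · rcases getD_set_true_cases V (wIdx G.length node) u hV1u with rfl | hVu'
        · -- u = wIdx node; v's preimage is in node's row, hence marked by the fold
          obtain ⟨x, hx, hwx⟩ := hstep.2
          have := L3 x hx
          rwa [hwx] at this
        · rw [hVu'] at hVu; cases hVu

lemma markRowB_basic (n : Nat) :
    ∀ (row : List Int), (∀ v ∈ row, -(n:Int) ≤ v ∧ v < (n:Int)) →
    ∀ st : List Bool × Bool, st.1.length = n →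
      ((markRowB row st).1.length = n ∧
      SubV st.1 (markRowB row st).1 ∧
      (st.2 = true → (markRowB row st).2 = true) ∧
      (∀ v ∈ row, (markRowB row st).1.getD (wIdx n v) false = true) ∧
      (∀ i : Nat, (markRowB row st).1.getD i false = true →
        st.1.getD i false = true ∨ ∃ v ∈ row, (wIdx n v) = i)) := by
  intro row
  induction row with
  | nil =>
    intro _ st hlen
    exact ⟨hlen, subV_refl _, fun h => h, by simp, fun i h => Or.inl h⟩
  | cons h t ih =>
    intro hrow st hlen
    have hh := hrow h (by simp)
    have hlt : (wIdx n h) < st.1.length := by rw [hlen]; exact wIdx_lt n h hh.1 hh.2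
    have hget : PySem.List.pyGetD st.1 h false = st.1.getD (wIdx n h) false :=
      pyGetD_wrap st.1 false h n hlen hh.1 hh.2
    have hset : PySem.List.pySetD st.1 h true = st.1.set (wIdx n h) true :=
      pySetD_wrap st.1 h true n hlen hh.1 hh.2
    have hunf : markRowB (h :: t) st =
        markRowB t (if PySem.List.pyGetD st.1 h false then st
          else (PySem.List.pySetD st.1 h true, true)) := rfl
    rw [hunf]
    by_cases hv : st.1.getD (wIdx n h) false = true
    · rw [if_pos (by rw [hget]; exact hv)]
      obtain ⟨L1, L2, L3, L4, L5⟩ := ih (fun v hv => hrow v (by simp [hv])) st hlen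
      refine ⟨L1, L2, L3, ?_, ?_⟩
      · intro v hvm
        rcases List.mem_cons.1 hvm with rfl | hvt
        · exact L2 (wIdx n v) hv
        · exact L4 v hvt
      · intro i hi
        rcases L5 i hi with hS | ⟨v, hvt, hvi⟩
        · exact Or.inl hS
        · exact Or.inr ⟨v, by simp [hvt], hvi⟩
    · rw [if_neg (by rw [hget]; simpa using hv)]
      rw [hset]
      obtain ⟨L1, L2, L3, L4, L5⟩ :=
        ih (fun v hv => hrow v (by simp [hv])) (st.1.set (wIdx n h) true, true) (by simp [hlen])
      refine ⟨L1, subV_trans (subV_set st.1 (wIdx n h)) L2, fun _ => L3 rfl, ?_, ?_⟩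
      · intro v hvm
        rcases List.mem_cons.1 hvm with rfl | hvt
        · exact L2 (wIdx n v) (getD_set_true_self st.1 (wIdx n v) hlt)
        · exact L4 v hvt
      · intro i hi
        rcases L5 i hi with hS | ⟨v, hvt, hvi⟩
        · rcases getD_set_true_cases st.1 (wIdx n h) i hS with rfl | hSi
          · exact Or.inr ⟨h, by simp, rfl⟩
          · exact Or.inl hSi
        · exact Or.inr ⟨v, by simp [hvt], hvi⟩

lemma markRowB_flags (n : Nat) :
    ∀ (row : List Int), (∀ v ∈ row, -(n:Int) ≤ v ∧ v < (n:Int)) →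
    ∀ st : List Bool × Bool, st.1.length = n →
      (((markRowB row st).2 = false → (markRowB row st).1 = st.1 ∧ st.2 = false) ∧
      (∀ v ∈ row, st.1.getD (wIdx n v) false = false → (markRowB row st).2 = true) ∧
      ((markRowB row st).2 = true → st.2 = true ∨
        ∃ i : Nat, st.1.getD i false = false ∧ (markRowB row st).1.getD i false = true)) := by
  intro row
  induction row with
  | nil =>
    intro _ st _
    exact ⟨fun h => ⟨rfl, h⟩, by simp, fun h => Or.inl h⟩
  | cons h t ih =>
    intro hrow st hlen
    have hh := hrow h (by simp)
    have hlt : (wIdx n h) < st.1.length := by rw [hlen]; exact wIdx_lt n h hh.1 hh.2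
    have hget : PySem.List.pyGetD st.1 h false = st.1.getD (wIdx n h) false :=
      pyGetD_wrap st.1 false h n hlen hh.1 hh.2
    have hset : PySem.List.pySetD st.1 h true = st.1.set (wIdx n h) true :=
      pySetD_wrap st.1 h true n hlen hh.1 hh.2
    have hunf : markRowB (h :: t) st =
        markRowB t (if PySem.List.pyGetD st.1 h false then st
          else (PySem.List.pySetD st.1 h true, true)) := rfl
    rw [hunf]
    by_cases hv : st.1.getD (wIdx n h) false = true
    · rw [if_pos (by rw [hget]; exact hv)]
      obtain ⟨F1, F2, F3⟩ := ih (fun v hv => hrow v (by simp [hv])) st hlen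
      refine ⟨F1, ?_, F3⟩
      intro v hvm hvf
      rcases List.mem_cons.1 hvm with rfl | hvt
      · rw [hv] at hvf; cases hvf
      · exact F2 v hvt hvf
    · rw [if_neg (by rw [hget]; simpa using hv)]
      rw [hset]
      have hvf : st.1.getD (wIdx n h) false = false := by
        cases hx : st.1.getD (wIdx n h) false
        · rfl
        · exact absurd hx hv
      obtain ⟨B1, B2, B3, B4, B5⟩ :=
        markRowB_basic n t (fun v hv => hrow v (by simp [hv])) (st.1.set (wIdx n h) true, true)
          (by simp [hlen])
      have hflag : (markRowB t (st.1.set (wIdx n h) true, true)).2 = true := B3 rfl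
      refine ⟨fun hc => absurd (hflag ▸ hc) (by simp), fun _ _ _ => hflag, fun _ => ?_⟩
      exact Or.inr ⟨(wIdx n h), hvf, B2 (wIdx n h) (getD_set_true_self st.1 (wIdx n h) hlt)⟩

lemma row_ok (G : List (List Int)) (hG : Pre_es1 G) (u : Nat) (hu : u < G.length) :
    ∀ v ∈ G.getD u [], -(G.length:Int) ≤ v ∧ v < (G.length:Int) := by
  intro v hv
  have hmem : G.getD u [] ∈ G := by
    rw [List.getD_eq_getElem?_getD, List.getElem?_eq_getElem hu]
    exact List.getElem_mem hu
  exact hG _ hmem v hv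

lemma roundFold_basic (G : List (List Int)) (hG : Pre_es1 G) (RC : Nat → Prop)
    (hRCc : ∀ u v : Nat, StepN G u v → RC u → RC v) :
    ∀ (us : List Nat), (∀ u ∈ us, u < G.length) →
    ∀ st : List Bool × Bool, st.1.length = G.length →
    (∀ i : Nat, st.1.getD i false = true → RC i) →
    ((us.foldl (fun st u => if st.1.getD u false then markRowB (G.getD u []) st else st) st).1.length = G.length ∧
     SubV st.1 (us.foldl (fun st u => if st.1.getD u false then markRowB (G.getD u []) st else st) st).1 ∧
     (st.2 = true → (us.foldl (fun st u => if st.1.getD u false then markRowB (G.getD u []) st else st) st).2 = true) ∧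
     (∀ i : Nat, (us.foldl (fun st u => if st.1.getD u false then markRowB (G.getD u []) st else st) st).1.getD i false = true → RC i) ∧
     (∀ u ∈ us, st.1.getD u false = true → ∀ v ∈ G.getD u [],
       (us.foldl (fun st u => if st.1.getD u false then markRowB (G.getD u []) st else st) st).1.getD (wIdx G.length v) false = true)) := by
  intro us
  induction us with
  | nil =>
    intro _ st hlen hRC0
    exact ⟨hlen, subV_refl _, fun h => h, hRC0, by simp⟩
  | cons u t ih =>
    intro hus st hlen hRC0
    have hu : u < G.length := hus u (by simp)
    simp only [List.foldl_cons]
    by_cases hg : st.1.getD u false = true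
    · rw [if_pos hg]
      obtain ⟨B1, B2, B3, B4, B5⟩ := markRowB_basic G.length (G.getD u [])
        (row_ok G hG u hu) st hlen
      have hRC1 : ∀ i : Nat, (markRowB (G.getD u []) st).1.getD i false = true → RC i := by
        intro i hi
        rcases B5 i hi with hS | ⟨v, hvm, rfl⟩
        · exact hRC0 i hS
        · exact hRCc u (wIdx G.length v) ⟨hu, v, hvm, rfl⟩ (hRC0 u hg)
      obtain ⟨L1, L2, L3, L4, L5⟩ := ih (fun x hx => hus x (by simp [hx]))
        (markRowB (G.getD u []) st) B1 hRC1
      refine ⟨L1, subV_trans B2 L2, fun h => L3 (B3 h), L4, ?_⟩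
      intro u' hu' hSu' v hv
      rcases List.mem_cons.1 hu' with rfl | hut
      · exact L2 (wIdx G.length v) (B4 v hv)
      · exact L5 u' hut (B2 u' hSu') v hv
    · rw [if_neg hg]
      obtain ⟨L1, L2, L3, L4, L5⟩ := ih (fun x hx => hus x (by simp [hx])) st hlen hRC0
      refine ⟨L1, L2, L3, L4, ?_⟩
      intro u' hu' hSu' v hv
      rcases List.mem_cons.1 hu' with rfl | hut
      · exact absurd hSu' hg
      · exact L5 u' hut hSu' v hv

lemma roundFold_flags (G : List (List Int)) (hG : Pre_es1 G) :
    ∀ (us : List Nat), (∀ u ∈ us, u < G.length) →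
    ∀ st : List Bool × Bool, st.1.length = G.length →
    (((us.foldl (fun st u => if st.1.getD u false then markRowB (G.getD u []) st else st) st).2 = false →
       (us.foldl (fun st u => if st.1.getD u false then markRowB (G.getD u []) st else st) st).1 = st.1 ∧ st.2 = false) ∧
     ((us.foldl (fun st u => if st.1.getD u false then markRowB (G.getD u []) st else st) st).2 = false →
       ∀ u ∈ us, st.1.getD u false = true → ∀ v ∈ G.getD u [], st.1.getD (wIdx G.length v) false = true) ∧
     ((us.foldl (fun st u => if st.1.getD u false then markRowB (G.getD u []) st else st) st).2 = true →
       st.2 = true ∨ ∃ i : Nat, st.1.getD i false = false ∧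
         (us.foldl (fun st u => if st.1.getD u false then markRowB (G.getD u []) st else st) st).1.getD i false = true)) := by
  intro us
  induction us with
  | nil =>
    intro _ st _
    exact ⟨fun h => ⟨rfl, h⟩, by simp, fun h => Or.inl h⟩
  | cons u t ih =>
    intro hus st hlen
    have hu : u < G.length := hus u (by simp)
    simp only [List.foldl_cons]
    by_cases hg : st.1.getD u false = true
    · rw [if_pos hg]
      obtain ⟨B1, B2, B3, B4, B5⟩ := markRowB_basic G.length (G.getD u [])
        (row_ok G hG u hu) st hlen
      obtain ⟨M1, M2, M3⟩ := markRowB_flags G.length (G.getD u [])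
        (row_ok G hG u hu) st hlen
      obtain ⟨F1, F2, F3⟩ := ih (fun x hx => hus x (by simp [hx]))
        (markRowB (G.getD u []) st) B1
      obtain ⟨R1, R2, R3, R4, R5⟩ := roundFold_basic G hG (fun _ => True)
        (fun _ _ _ _ => trivial) t (fun x hx => hus x (by simp [hx]))
        (markRowB (G.getD u []) st) B1 (fun _ _ => trivial)
      refine ⟨?_, ?_, ?_⟩
      · intro hf
        obtain ⟨hm1, hm2⟩ := F1 hf
        obtain ⟨hm3, hm4⟩ := M1 hm2
        exact ⟨by rw [hm1, hm3], hm4⟩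
      · intro hf u' hu' hSu' v hv
        obtain ⟨hm1, hm2⟩ := F1 hf
        obtain ⟨hm3, _⟩ := M1 hm2
        rcases List.mem_cons.1 hu' with rfl | hut
        · -- row of u is already all marked, else markRowB would have set the flag
          cases hx : st.1.getD (wIdx G.length v) false
          · exact absurd (M2 v hv hx) (by rw [hm2]; simp)
          · rfl
        · have := F2 hf u' hut (by rwa [hm3]) v hv
          rwa [hm3] at this
      · intro hf
        rcases F3 hf with hm2 | ⟨i, hif, hit⟩
        · rcases M3 hm2 with hst | ⟨i, hif, hit⟩
          · exact Or.inl hst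
          · exact Or.inr ⟨i, hif, R2 i hit⟩
        · cases hx : st.1.getD i false
          · exact Or.inr ⟨i, hx, hit⟩
          · rw [B2 i hx] at hif; cases hif
    · rw [if_neg hg]
      obtain ⟨F1, F2, F3⟩ := ih (fun x hx => hus x (by simp [hx])) st hlen
      refine ⟨F1, ?_, F3⟩
      intro hf u' hu' hSu' v hv
      rcases List.mem_cons.1 hu' with rfl | hut
      · exact absurd hSu' hg
      · exact F2 hf u' hut hSu' v hv

lemma foldl_const_eq_iterate {α β : Type} (g : β → β) :
    ∀ (l : List α) (s : β), l.foldl (fun st _ => g st) s = g^[l.length] s := by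
  intro l
  induction l with
  | nil => intro s; rfl
  | cons x t ih =>
    intro s
    simp only [List.foldl_cons, List.length_cons]
    rw [ih (g s), Function.iterate_succ_apply]

lemma saturateB_spec (G : List (List Int)) (hG : Pre_es1 G) (V0 : List Bool)
    (hlen : V0.length = G.length) (RC : Nat → Prop)
    (hRCc : ∀ u v : Nat, StepN G u v → RC u → RC v)
    (hRC0 : ∀ i : Nat, V0.getD i false = true → RC i)
    (hpos : 1 ≤ cnt V0) :
    ((saturateB G G.length V0).length = G.length ∧
     SubV V0 (saturateB G G.length V0) ∧
     (∀ i : Nat, (saturateB G G.length V0).getD i false = true → RC i) ∧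
     ClosedSt G (saturateB G G.length V0)) := by
  set g : List Bool × Bool → List Bool × Bool := fun st =>
    if st.2 then st else ((roundB G G.length st.1).1, !(roundB G G.length st.1).2) with hg
  have hrange : ∀ u ∈ List.range G.length, u < G.length := fun u hu => List.mem_range.1 hu
  have key : ∀ k : Nat,
      (g^[k] (V0, false)).1.length = G.length ∧
      SubV V0 (g^[k] (V0, false)).1 ∧
      (∀ i : Nat, (g^[k] (V0, false)).1.getD i false = true → RC i) ∧
      ((g^[k] (V0, false)).2 = true → ClosedSt G (g^[k] (V0, false)).1) ∧
      ((g^[k] (V0, false)).2 = false → k + cnt V0 ≤ cnt (g^[k] (V0, false)).1) := by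
    intro k
    induction k with
    | zero =>
      exact ⟨hlen, subV_refl _, hRC0, by simp, by simp⟩
    | succ k ih =>
      obtain ⟨I1, I2, I3, I4, I5⟩ := ih
      rw [Function.iterate_succ_apply']
      set st := g^[k] (V0, false) with hst
      cases hflag : st.2
      · have hr : roundB G G.length st.1 =
            (List.range G.length).foldl
              (fun st u => if st.1.getD u false then markRowB (G.getD u []) st else st)
              (st.1, false) := rfl
        obtain ⟨R1, R2, R3, R4, R5⟩ := roundFold_basic G hG RC hRCc
          (List.range G.length) hrange (st.1, false) I1 I3
        obtain ⟨F1, F2, F3⟩ := roundFold_flags G hG (List.range G.length) hrange (st.1, false) I1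
        rw [← hr] at R1 R2 R3 R4 R5 F1 F2 F3
        have hcnt5 := I5 hflag
        have hstep : g st = ((roundB G G.length st.1).1, !(roundB G G.length st.1).2) := by
          rw [hg]; simp [hflag]
        rw [hstep]
        refine ⟨R1, subV_trans I2 R2, R4, ?_, ?_⟩
        · intro hc
          simp only [Bool.not_eq_true'] at hc
          obtain ⟨he, _⟩ := F1 hc
          rw [he]
          intro u v hsuv hu
          have hrowsub := F2 hc u (List.mem_range.2 hsuv.1) hu
          obtain ⟨x, hx, hwx⟩ := hsuv.2
          have := hrowsub x hx
          rwa [hwx] at this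
        · intro hc
          simp only [Bool.not_eq_false'] at hc
          rcases F3 hc with h' | ⟨i, hif, hit⟩
          · cases h'
          · have hstrict : cnt st.1 < cnt (roundB G G.length st.1).1 :=
              cnt_strict (show st.1.length = (roundB G G.length st.1).1.length by rw [I1, R1]) R2 i hif hit
            show k + 1 + cnt V0 ≤ cnt (roundB G G.length st.1).1
            omega
      · have hstep : g st = st := by rw [hg]; simp [hflag]
        rw [hstep]
        exact ⟨I1, I2, I3, I4, fun hc => absurd hflag (by rw [hc]; simp)⟩
  obtain ⟨K1, K2, K3, K4, K5⟩ := key G.length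
  have hsat : saturateB G G.length V0 = (g^[G.length] (V0, false)).1 := by
    unfold saturateB
    rw [show (List.range G.length).foldl
        (fun (st : List Bool × Bool) _ =>
          if st.2 then st else ((roundB G G.length st.1).1, !(roundB G G.length st.1).2))
        (V0, false) = g^[(List.range G.length).length] (V0, false) from
      foldl_const_eq_iterate g (List.range G.length) (V0, false)]
    simp
  have hflag : (g^[G.length] (V0, false)).2 = true := by
    cases hx : (g^[G.length] (V0, false)).2
    · exfalso
      have := K5 hx
      have h2 := cnt_le_length (g^[G.length] (V0, false)).1
      omega
    · rfl
  rw [hsat]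
  exact ⟨K1, K2, K3, K4 hflag⟩

lemma closed_reach (G : List (List Int)) (W : List Bool) (hcl : ClosedSt G W)
    (i j : Nat) (hr : ReachN G i j) (hi : W.getD i false = true) :
    W.getD j false = true := by
  induction hr with
  | refl => exact hi
  | tail _ h2 ih => exact hcl _ _ h2 ih

lemma seedStep_A (G : List (List Int)) (hG : Pre_es1 G) (V : List Bool)
    (hlen : V.length = G.length) (hcl : ClosedSt G V) (i : Nat) (hi : i < G.length)
    (hV : V.getD i false = false) (c : List Int) :
    ((dfsA G G.length (Int.ofNat i) V c).1.length = G.length ∧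
     (∀ j : Nat, j < G.length → ((dfsA G G.length (Int.ofNat i) V c).1.getD j false = true ↔
        V.getD j false = true ∨ ReachN G i j)) ∧
     ClosedSt G (dfsA G G.length (Int.ofNat i) V c).1) := by
  have htn : wIdx G.length (Int.ofNat i) = i := wIdx_natCast G.length i
  obtain ⟨D1, D2, D3, D4, D5⟩ := dfsA_spec G hG G.length (Int.ofNat i) V c hlen
    (le_trans (by omega) (Int.natCast_nonneg i)) (Int.ofNat_lt.2 hi) (by rwa [htn])
    (by have := cnt_le_length V; omega)
  have hclW : ClosedSt G (dfsA G G.length (Int.ofNat i) V c).1 := by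
    intro u v hst hWu
    cases hVu : V.getD u false
    · exact D5 u v hst hWu hVu
    · exact D2 v (hcl u v hst hVu)
  refine ⟨D1, fun j hj => ⟨fun h => D4 j hj h, fun h => ?_⟩, hclW⟩
  rcases h with hVj | hr
  · exact D2 j hVj
  · exact closed_reach G _ hclW i j hr D3

lemma seedStep_B (G : List (List Int)) (hG : Pre_es1 G) (V : List Bool)
    (hlen : V.length = G.length) (hcl : ClosedSt G V) (i : Nat) (hi : i < G.length) :
    ((saturateB G G.length (V.set i true)).length = G.length ∧
     (∀ j : Nat, j < G.length → ((saturateB G G.length (V.set i true)).getD j false = true ↔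
        V.getD j false = true ∨ ReachN G i j))) := by
  have hRCc : ∀ u v : Nat, StepN G u v →
      (V.getD u false = true ∨ ReachN G i u) → (V.getD v false = true ∨ ReachN G i v) := by
    intro u v hst h
    rcases h with hV' | hr
    · exact Or.inl (hcl u v hst hV')
    · exact Or.inr (Relation.ReflTransGen.tail hr hst)
  have hRC0 : ∀ j : Nat, (V.set i true).getD j false = true →
      V.getD j false = true ∨ ReachN G i j := by
    intro j hj
    rcases getD_set_true_cases V i j hj with rfl | hVj
    · exact Or.inr Relation.ReflTransGen.refl
    · exact Or.inl hVj
  have hset : (V.set i true).getD i false = true := getD_set_true_self V i (by omega)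
  obtain ⟨S1, S2, S3, S4⟩ := saturateB_spec G hG (V.set i true) (by simp [hlen]) _
    hRCc hRC0 (cnt_pos _ i hset)
  refine ⟨S1, fun j hj => ⟨fun h => S3 j h, fun h => ?_⟩⟩
  rcases h with hVj | hr
  · exact S2 j (subV_set V i j hVj)
  · exact closed_reach G _ S4 i j hr (S2 i hset)

lemma dfsA_comp_extends (G : List (List Int)) :
    ∀ (fuel : Nat) (node : Int) (V : List Bool) (c : List Int),
      ∃ t, (dfsA G fuel node V c).2 = c ++ t := by
  intro fuel
  induction fuel with
  | zero => intro node V c; exact ⟨[], by simp [dfsA]⟩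
  | succ fuel ih =>
    intro node V c
    have inner : ∀ (row : List Int) (S : List Bool) (c0 : List Int),
        ∃ t, (row.foldl (fun st nb => if PySem.List.pyGetD st.1 nb false then st
          else dfsA G fuel nb st.1 st.2) (S, c0)).2 = c0 ++ t := by
      intro row
      induction row with
      | nil => intro S c0; exact ⟨[], by simp⟩
      | cons h t iht =>
        intro S c0
        simp only [List.foldl_cons]
        by_cases hg : PySem.List.pyGetD S h false = true
        · rw [if_pos hg]; exact iht S c0
        · rw [if_neg hg]
          obtain ⟨t1, ht1⟩ := ih h S c0
          obtain ⟨t2, ht2⟩ := iht (dfsA G fuel h S c0).1 (dfsA G fuel h S c0).2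
          refine ⟨t1 ++ t2, ?_⟩
          rw [show (dfsA G fuel h S c0) = ((dfsA G fuel h S c0).1, (dfsA G fuel h S c0).2) from rfl] at ht2
          rw [ht2, ht1, List.append_assoc]
    obtain ⟨t, ht⟩ := inner (PySem.List.pyGetD G node []) (PySem.List.pySetD V node true) (c ++ [node])
    exact ⟨node :: t, by rw [show dfsA G (fuel+1) node V c = ((PySem.List.pyGetD G node []).foldl
      (fun st nb => if PySem.List.pyGetD st.1 nb false then st else dfsA G fuel nb st.1 st.2)
      (PySem.List.pySetD V node true, c ++ [node])) from rfl, ht]; simp⟩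

lemma foldNbrs_comp_extends (G : List (List Int)) (fuel : Nat) :
    ∀ (row : List Int) (S : List Bool) (c0 : List Int),
      ∃ t, (row.foldl (fun st nb => if PySem.List.pyGetD st.1 nb false then st
        else dfsA G fuel nb st.1 st.2) (S, c0)).2 = c0 ++ t := by
  intro row
  induction row with
  | nil => intro S c0; exact ⟨[], by simp⟩
  | cons h t iht =>
    intro S c0
    simp only [List.foldl_cons]
    by_cases hg : PySem.List.pyGetD S h false = true
    · rw [if_pos hg]; exact iht S c0
    · rw [if_neg hg]
      obtain ⟨t1, ht1⟩ := dfsA_comp_extends G fuel h S c0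
      obtain ⟨t2, ht2⟩ := iht (dfsA G fuel h S c0).1 (dfsA G fuel h S c0).2
      refine ⟨t1 ++ t2, ?_⟩
      rw [show (dfsA G fuel h S c0) = ((dfsA G fuel h S c0).1, (dfsA G fuel h S c0).2) from rfl] at ht2
      rw [ht2, ht1, List.append_assoc]

lemma dfsA_comp_head (G : List (List Int)) (fuel : Nat) (node : Int) (V : List Bool) :
    (dfsA G (fuel+1) node V []).2.headD 0 = node := by
  obtain ⟨t, ht⟩ := foldNbrs_comp_extends G fuel (PySem.List.pyGetD G node [])
    (PySem.List.pySetD V node true) ([] ++ [node])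
  rw [show dfsA G (fuel+1) node V [] = ((PySem.List.pyGetD G node []).foldl
    (fun st nb => if PySem.List.pyGetD st.1 nb false then st else dfsA G fuel nb st.1 st.2)
    (PySem.List.pySetD V node true, [] ++ [node])) from rfl, ht]
  simp

lemma arches_eq_zip (comps : List (List Int)) :
    (List.range' 1 (comps.length - 1)).foldl
      (fun acc i => acc ++ [((comps.getD (i-1) []).headD 0, (comps.getD i []).headD 0)]) []
    = (comps.map (fun c => c.headD 0)).zip ((comps.map (fun c => c.headD 0)).drop 1) := by
  set l := comps.map (fun c => c.headD 0) with hl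
  have hlen : l.length = comps.length := by simp [hl]
  have hgd : ∀ i : Nat, i < comps.length → (comps.getD i []).headD 0 = l.getD i 0 := by
    intro i hi
    rw [List.getD_eq_getElem?_getD, List.getD_eq_getElem?_getD,
      List.getElem?_eq_getElem hi, List.getElem?_eq_getElem (by omega),
      List.getElem_map]
    rfl
  rw [PySem.List.foldl_append_singleton_eq_map
    (fun i => ((comps.getD (i-1) []).headD 0, (comps.getD i []).headD 0))
    (List.range' 1 (comps.length - 1)) []]
  rw [List.nil_append]
  apply List.ext_getElem
  · simp only [List.length_map, List.length_range', List.length_zip, List.length_drop, hlen]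
    omega
  · intro j h1 h2
    have hj : j < comps.length - 1 := by simpa using h1
    rw [List.getElem_map, List.getElem_range']
    rw [List.getElem_zip, List.getElem_drop]
    have e1 : 1 + 1 * j - 1 = j := by omega
    have e2 : (comps.getD (1 + 1 * j - 1) []).headD 0 = l.getD j 0 := by
      rw [e1]; exact hgd j (by omega)
    have e3 : (comps.getD (1 + 1 * j) []).headD 0 = l.getD (1 + j) 0 := by
      have : 1 + 1 * j = 1 + j := by omega
      rw [this]; exact hgd (1 + j) (by omega)
    rw [e2, e3]
    rw [List.getD_eq_getElem?_getD, List.getD_eq_getElem?_getD,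
      List.getElem?_eq_getElem (by omega), List.getElem?_eq_getElem (by omega)]
    rfl

-- the two outer loops, as functions of the prefix length
def fA (G : List (List Int)) : (List Bool × List (List Int)) → Nat → (List Bool × List (List Int)) :=
  fun st i => if st.1.getD i false then st
    else ((dfsA G G.length (Int.ofNat i) st.1 []).1, st.2 ++ [(dfsA G G.length (Int.ofNat i) st.1 []).2])

def fB (G : List (List Int)) : (List Bool × List Int) → Nat → (List Bool × List Int) :=
  fun st i => if st.1.getD i false then st
    else (saturateB G G.length (st.1.set i true), st.2 ++ [(i : Int)])

lemma loop_inv (G : List (List Int)) (hG : Pre_es1 G) : ∀ k, k ≤ G.length →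
    (((List.range k).foldl (fA G) (List.replicate G.length false, [])).1
       = ((List.range k).foldl (fB G) (List.replicate G.length false, [])).1 ∧
     ((List.range k).foldl (fA G) (List.replicate G.length false, [])).1.length = G.length ∧
     ClosedSt G ((List.range k).foldl (fA G) (List.replicate G.length false, [])).1 ∧
     ((List.range k).foldl (fA G) (List.replicate G.length false, [])).2.map (fun c => c.headD 0)
       = ((List.range k).foldl (fB G) (List.replicate G.length false, [])).2) := by
  intro k
  induction k with
  | zero =>
    intro _
    refine ⟨rfl, by simp, ?_, rfl⟩
    intro u v _ hu
    simp only [List.range_zero, List.foldl_nil] at hu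
    rw [getD_replicate_false] at hu; cases hu
  | succ k ih =>
    intro hk1
    obtain ⟨E1, E2, E3, E4⟩ := ih (by omega)
    have hk : k < G.length := by omega
    set sA := (List.range k).foldl (fA G) (List.replicate G.length false, []) with hsA
    set sB := (List.range k).foldl (fB G) (List.replicate G.length false, []) with hsB
    rw [List.range_succ, List.foldl_append, List.foldl_cons, List.foldl_nil,
        List.foldl_append, List.foldl_cons, List.foldl_nil, ← hsA, ← hsB]
    by_cases hg : sA.1.getD k false = true
    · have hA : fA G sA k = sA := by rw [fA, if_pos hg]
      have hB : fB G sB k = sB := by rw [fB, if_pos (by rw [← E1]; exact hg)]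
      rw [hA, hB]
      exact ⟨E1, E2, E3, E4⟩
    · have hgf : sA.1.getD k false = false := by
        cases hx : sA.1.getD k false
        · rfl
        · exact absurd hx hg
      have hA : fA G sA k = ((dfsA G G.length (Int.ofNat k) sA.1 []).1,
          sA.2 ++ [(dfsA G G.length (Int.ofNat k) sA.1 []).2]) := by
        rw [fA, if_neg (by rw [hgf]; simp)]
      have hB : fB G sB k = (saturateB G G.length (sB.1.set k true), sB.2 ++ [(k : Int)]) := by
        rw [fB, if_neg (by rw [← E1, hgf]; simp)]
      rw [hA, hB, ← E1]
      obtain ⟨A1, A2, A3⟩ := seedStep_A G hG sA.1 E2 E3 k hk hgf []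
      obtain ⟨B1, B2⟩ := seedStep_B G hG sA.1 E2 E3 k hk
      have hWeq : (dfsA G G.length (Int.ofNat k) sA.1 []).1
          = saturateB G G.length (sA.1.set k true) := by
        apply ext_of_getD _ _ (by rw [A1, B1])
        intro j hj
        have hj' : j < G.length := by rw [A1] at hj; omega
        have hiffA := A2 j hj'
        have hiffB := B2 j hj'
        by_cases hrc : sA.1.getD j false = true ∨ ReachN G k j
        · rw [hiffA.2 hrc, hiffB.2 hrc]
        · cases hxa : (dfsA G G.length (Int.ofNat k) sA.1 []).1.getD j false
          · cases hxb : (saturateB G G.length (sA.1.set k true)).getD j false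
            · rfl
            · exact absurd (hiffB.1 hxb) hrc
          · exact absurd (hiffA.1 hxa) hrc
      have hm : ∃ m, G.length = m + 1 := ⟨G.length - 1, by omega⟩
      obtain ⟨m, hmeq⟩ := hm
      have hhead : (dfsA G G.length (Int.ofNat k) sA.1 []).2.headD 0 = Int.ofNat k := by
        rw [hmeq]; exact dfsA_comp_head G m (Int.ofNat k) sA.1
      refine ⟨hWeq, by rw [A1], A3, ?_⟩
      rw [List.map_append, E4, List.map_cons, List.map_nil, hhead]
      rfl

lemma es1_eq (G : List (List Int)) (hG : Pre_es1 G) : es1 G = es1_alt G := by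
  obtain ⟨E1, E2, E3, E4⟩ := loop_inv G hG G.length le_rfl
  have hA : es1 G = (List.range' 1
      (((List.range G.length).foldl (fA G) (List.replicate G.length false, [])).2.length - 1)).foldl
      (fun acc i => acc ++
        [((((List.range G.length).foldl (fA G) (List.replicate G.length false, [])).2.getD (i-1) []).headD 0,
          (((List.range G.length).foldl (fA G) (List.replicate G.length false, [])).2.getD i []).headD 0)]) [] := rfl
  have hB : es1_alt G = ((List.range G.length).foldl (fB G) (List.replicate G.length false, [])).2.zip
      (((List.range G.length).foldl (fB G) (List.replicate G.length false, [])).2.drop 1) := rfl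
  rw [hA, hB, arches_eq_zip, E4]

theorem es1_spec : Claim_equal_es1 := by
  intro G _ hPre
  show es1 G = es1_alt G
  exact es1_eq G hPre
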